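-- pv_equiv track=rewrite | github.com/WalterLiu417/Maths-Physics-Revision | maths/Matrices/gaussian_elimination.py | myparse
-- ===== SOURCE A (Python) =====
-- def myparse(chars, st):
--     res = []
--     astr = ""
--     for a in st:
--         if a in chars:
--             res.append(astr)
--             astr = ""
--         elif a == "-":
--             res.append(astr)
--             astr = "-"
--         else:
--             astr += a
--     res.append(astr)
--     return res
-- ===== SOURCE B (Python) =====
-- def myparse(chars, st):
--     # Two staged passes instead of A's one-pass state machine:
--     # 1) collect delimiter cut spans (i,i+1) for chars, zero-width (i,i) before '-';
--     # 2) slice st between consecutive cuts.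
--     cuts = []
--     for i, c in enumerate(st):
--         if c in chars:
--             cuts.append((i, i + 1))   # consuming delimiter
--         elif c == "-":
--             cuts.append((i, i))       # zero-width cut before '-'
--     res = []
--     pos = 0
--     for a, b in cuts:
--         res.append(st[pos:a])
--         pos = b
--     res.append(st[pos:])
--     return res
-- ===== Notes on version B (the rewrite author's own statement) =====
-- stated objective: alternative
-- what changed: B replaces A's single-pass accumulator state machine by two staged passes: it first computes the list of delimiter cut spans (consuming spans for chars, zero-width cuts before '-'), then slices st between consecutive cuts.
import Mathlib
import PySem

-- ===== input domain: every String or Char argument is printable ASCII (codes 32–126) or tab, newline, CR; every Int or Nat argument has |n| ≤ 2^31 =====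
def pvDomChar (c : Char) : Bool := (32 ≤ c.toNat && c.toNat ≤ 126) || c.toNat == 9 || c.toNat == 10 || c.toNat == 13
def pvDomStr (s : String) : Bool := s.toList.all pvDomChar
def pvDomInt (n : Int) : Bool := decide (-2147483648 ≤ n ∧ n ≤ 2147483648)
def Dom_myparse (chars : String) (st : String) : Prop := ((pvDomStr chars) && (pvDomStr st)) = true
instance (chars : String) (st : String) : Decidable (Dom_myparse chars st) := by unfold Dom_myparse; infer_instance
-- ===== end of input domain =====

-- B re-implements the tokenizer in two staged passes (collect delimiter cut spans,
-- then slice between them) instead of A's one-pass state machine; same return value,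
-- no side effects (alternative, not faster).

-- ===== PORT A =====
-- literal port of A's loop: state (res, astr), one step per character of st
def myparseA_go (chars : List Char) (res : List (List Char)) (astr : List Char) :
    List Char → List (List Char)
  | [] => res ++ [astr]
  | a :: rest =>
    if a ∈ chars then myparseA_go chars (res ++ [astr]) [] rest
    else if a = '-' then myparseA_go chars (res ++ [astr]) ['-'] rest
    else myparseA_go chars res (astr ++ [a]) rest

def myparse (chars : String) (st : String) : List String :=
  (myparseA_go chars.toList [] [] st.toList).map (fun t => String.ofList t)

-- ===== PORT B =====
-- literal port of Source B pass 1: the 'for i, c in enumerate(st)' loop appending cut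
-- spans, with the running index made an explicit parameter
def cutsFrom (chars : List Char) (i : Nat) : List Char → List (Nat × Nat)
  | [] => []
  | c :: r =>
    if c ∈ chars then (i, i + 1) :: cutsFrom chars (i + 1) r
    else if c = '-' then (i, i) :: cutsFrom chars (i + 1) r
    else cutsFrom chars (i + 1) r

-- literal port of Source B pass 2: slicing between cuts; st[pos:a] with
-- 0 ≤ pos ≤ a ≤ len(st) (guaranteed by how cuts are built) is exactly
-- (l.drop pos).take (a - pos), and st[pos:] is l.drop pos
def goB (l : List Char) (pos : Nat) : List (Nat × Nat) → List (List Char)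
  | [] => [l.drop pos]
  | (a, b) :: r => ((l.drop pos).take (a - pos)) :: goB l b r

def myparse_alt (chars : String) (st : String) : List String :=
  (goB st.toList 0 (cutsFrom chars.toList 0 st.toList)).map (fun t => String.ofList t)

-- ===== PRECONDITION & SPEC =====
def Spec_myparse (chars : String) (st : String) (out : List String) : Prop := out = myparse_alt chars st
instance (chars : String) (st : String) (out : List String) : Decidable (Spec_myparse chars st out) := by unfold Spec_myparse; infer_instance

-- ===== CLAIM (what is proved, stated in full; the proofs are below) =====
def Claim_equal_myparse : Prop := ∀ (chars : String) (st : String), Dom_myparse chars st → Spec_myparse chars st (myparse chars st)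

-- ===== LEMMAS AND PROOFS =====

-- reference tokenization, by structural recursion on the string
def mergeHead (xs : List (List Char)) (pre : List Char) : List (List Char) :=
  match xs with
  | [] => [pre]
  | h :: r => (pre ++ h) :: r

def fTok (chars : List Char) : List Char → List (List Char)
  | [] => [[]]
  | a :: t =>
    if a ∈ chars then [] :: fTok chars t
    else if a = '-' then [] :: mergeHead (fTok chars t) ['-']
    else mergeHead (fTok chars t) [a]

theorem mergeHead_ne_nil (xs : List (List Char)) (pre : List Char) : mergeHead xs pre ≠ [] := by
  cases xs <;> simp [mergeHead]

theorem fTok_ne_nil (chars : List Char) (l : List Char) : fTok chars l ≠ [] := by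
  cases l with
  | nil => simp [fTok]
  | cons a t =>
    simp only [fTok]
    split_ifs <;> simp [mergeHead_ne_nil]

theorem mergeHead_nil (xs : List (List Char)) (h : xs ≠ []) : mergeHead xs [] = xs := by
  cases xs with
  | nil => exact absurd rfl h
  | cons x r => simp [mergeHead]

theorem mergeHead_mergeHead (xs : List (List Char)) (s1 s2 : List Char) :
    mergeHead (mergeHead xs s2) s1 = mergeHead xs (s1 ++ s2) := by
  cases xs <;> simp [mergeHead]

-- A's loop computes the reference tokenization
theorem myparseA_go_eq (chars : List Char) (l : List Char) :
    ∀ (res : List (List Char)) (astr : List Char),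
      myparseA_go chars res astr l = res ++ mergeHead (fTok chars l) astr := by
  induction l with
  | nil => intro res astr; simp [myparseA_go, fTok, mergeHead]
  | cons a t ih =>
    intro res astr
    simp only [myparseA_go, fTok]
    split_ifs with h1 h2
    · rw [ih, mergeHead_nil _ (fTok_ne_nil chars t)]
      simp [mergeHead]
    · rw [ih]
      simp [mergeHead]
    · rw [ih, mergeHead_mergeHead]

-- B's slicing fold over the cut spans of the suffix l = full.drop q also computes
-- the reference tokenization, with the pending prefix full[pos:q] merged in front
theorem goB_cutsFrom (chars : List Char) (full : List Char) :
    ∀ (l : List Char) (q pos : Nat), full.drop q = l → pos ≤ q →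
      goB full pos (cutsFrom chars q l) =
        mergeHead (fTok chars l) ((full.drop pos).take (q - pos)) := by
  intro l
  induction l with
  | nil =>
    intro q pos hd hle
    have hlen : full.length ≤ q := by
      have := List.drop_eq_nil_iff.mp hd
      omega
    have : (full.drop pos).take (q - pos) = full.drop pos := by
      apply List.take_of_length_le
      simp [List.length_drop]
      omega
    simp [cutsFrom, goB, fTok, mergeHead, this]
  | cons c r ih =>
    intro q pos hd hle
    have hq : q < full.length := by
      by_contra h
      have : full.drop q = [] := List.drop_eq_nil_iff.mpr (by omega)
      rw [this] at hd; exact (List.cons_ne_nil c r) hd.symm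
    have hdr : full.drop (q + 1) = r := by
      have : full.drop (q + 1) = (full.drop q).drop 1 := by
        rw [List.drop_drop]
      rw [this, hd]; rfl
    have hget : full[q]? = some c := by
      have : (full.drop q)[0]? = full[q + 0]? := List.getElem?_drop
      rw [hd] at this
      simpa using this.symm
    simp only [cutsFrom]
    split_ifs with h1 h2
    · -- consuming delimiter
      simp only [goB]
      rw [ih (q + 1) (q + 1) hdr (le_refl _)]
      have : (q + 1) - (q + 1) = 0 := by omega
      rw [this]
      simp only [List.take_zero, fTok, if_pos h1]
      rw [mergeHead_nil _ (fTok_ne_nil chars r)]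
      simp [mergeHead]
    · -- zero-width cut before '-'
      simp only [goB]
      rw [ih (q + 1) q hdr (by omega)]
      have : (q + 1) - q = 1 := by omega
      rw [this]
      have h1t : (full.drop q).take 1 = ['-'] := by rw [hd, h2]; rfl
      rw [h1t]
      simp only [fTok, if_neg h1, if_pos h2]
      simp [mergeHead]
    · -- ordinary character: no cut, prefix grows by c
      rw [ih (q + 1) pos hdr (by omega)]
      have htake : (full.drop pos).take (q + 1 - pos) =
          (full.drop pos).take (q - pos) ++ [c] := by
        have hs : q + 1 - pos = (q - pos) + 1 := by omega
        rw [hs, List.take_add_one]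
        have : (full.drop pos)[q - pos]? = full[pos + (q - pos)]? :=
          List.getElem?_drop
        rw [this, (by omega : pos + (q - pos) = q), hget]
        rfl
      rw [htake]
      simp only [fTok, if_neg h1, if_neg h2]
      rw [mergeHead_mergeHead]

theorem myparse_eq_alt (chars st : String) : myparse chars st = myparse_alt chars st := by
  unfold myparse myparse_alt
  rw [myparseA_go_eq, goB_cutsFrom chars.toList st.toList st.toList 0 0 rfl (le_refl _)]
  simp [mergeHead_nil _ (fTok_ne_nil chars.toList st.toList)]

-- ===== VERDICT (by name: the statement is the Claim_ definition above) =====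
theorem myparse_spec : Claim_equal_myparse := by
  intro chars st _
  unfold Spec_myparse
  exact myparse_eq_alt chars st
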